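-- pv_equiv track=rewrite | github.com/senanursenol/speaker-diarization-gallery | scripts/legacy/sb_diarize_terminal.py | remap_labels_in_order_str
-- ===== SOURCE A (Python) =====
-- from collections import OrderedDict, defaultdict
--
-- def remap_labels_in_order_str(segments_sdli):
--     order = OrderedDict()
--     out=[]
--     for s,d,l in segments_sdli:
--         if l not in order:
--             order[l] = f"spk{len(order):02d}"
--         out.append((s,d,order[l]))
--     return out
-- ===== SOURCE B (Python) =====
-- def remap_labels_in_order_str(segments_sdli):
--     segs = list(segments_sdli)
--     firsts = dict.fromkeys(l for _, _, l in segs)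
--     mapping = {l: f"spk{i:02d}" for i, l in enumerate(firsts)}
--     return [(s, d, mapping[l]) for s, d, l in segs]
-- ===== Notes on version B (the rewrite author's own statement) =====
-- stated objective: alternative
-- what changed: B separates the two concerns A interleaves: a first pass builds the complete label->spkNN mapping (dict.fromkeys for first-seen order, then enumerate), and a second pass emits the output as a comprehension, instead of A's single loop that grows the dict while appending.
import Mathlib
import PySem

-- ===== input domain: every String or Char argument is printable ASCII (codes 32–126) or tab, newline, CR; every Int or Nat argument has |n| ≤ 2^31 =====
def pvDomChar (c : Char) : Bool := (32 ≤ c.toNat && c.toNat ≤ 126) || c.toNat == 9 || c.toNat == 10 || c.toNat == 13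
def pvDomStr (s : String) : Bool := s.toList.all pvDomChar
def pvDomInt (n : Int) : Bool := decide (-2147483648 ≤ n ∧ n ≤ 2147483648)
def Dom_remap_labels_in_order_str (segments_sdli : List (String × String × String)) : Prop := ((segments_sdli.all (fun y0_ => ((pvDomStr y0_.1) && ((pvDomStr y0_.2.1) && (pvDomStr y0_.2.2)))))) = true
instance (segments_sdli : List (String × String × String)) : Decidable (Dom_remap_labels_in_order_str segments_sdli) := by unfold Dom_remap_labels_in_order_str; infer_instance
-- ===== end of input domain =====

-- B builds the full label→spkNN table in a first pass and emits the output in a second pass,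
-- instead of A's single loop that grows the dict while appending (objective: alternative decomposition).


-- f"spk{n:02d}" for a nonnegative n (len(order) / enumerate index)
def spkName (n : Nat) : String := "spk" ++ PySem.Str.zfill (PySem.Int.toStr (n : Int)) 2

-- ===== PORT A =====
-- single loop: grow the OrderedDict on first sight of a label, append the looked-up name
def remap_labels_in_order_str (segments_sdli : List (String × String × String)) : List (String × String × String) :=
  (segments_sdli.foldl
    (fun (st : PySem.Dict String String × List (String × String × String)) t =>
      let order := if st.1.contains t.2.2 then st.1 else st.1.insert t.2.2 (spkName st.1.size)
      -- order[l]: the key is always present here, so getD's default is never used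
      (order, st.2 ++ [(t.1, t.2.1, (order.get? t.2.2).getD "")]))
    (PySem.Dict.empty, [])).2

-- ===== PORT B =====
-- pass 1: distinct labels in first-seen order (dict.fromkeys) and the full mapping; pass 2: comprehension
def remap_labels_in_order_str_alt (segments_sdli : List (String × String × String)) : List (String × String × String) :=
  let firsts : PySem.Set String := PySem.Set.ofList (segments_sdli.map (fun t => t.2.2))
  let mapping : PySem.Dict String String :=
    firsts.zipIdx.foldl (fun d p => d.insert p.1 (spkName p.2)) PySem.Dict.empty
  segments_sdli.map (fun t => (t.1, t.2.1, (mapping.get? t.2.2).getD ""))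

-- ===== PRECONDITION & SPEC =====
def Spec_remap_labels_in_order_str (segments_sdli : List (String × String × String)) (out : List (String × String × String)) : Prop := out = remap_labels_in_order_str_alt segments_sdli
instance (segments_sdli : List (String × String × String)) (out : List (String × String × String)) : Decidable (Spec_remap_labels_in_order_str segments_sdli out) := by unfold Spec_remap_labels_in_order_str; infer_instance

-- ===== CLAIM (what is proved, stated in full; the proofs are below) =====
def Claim_equal_remap_labels_in_order_str : Prop := ∀ (segments_sdli : List (String × String × String)), Dom_remap_labels_in_order_str segments_sdli → Spec_remap_labels_in_order_str segments_sdli (remap_labels_in_order_str segments_sdli)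

-- ===== LEMMAS AND PROOFS =====

-- A's loop body, named so the induction can be stated about it (definitionally the port's lambda)
def stepA (st : PySem.Dict String String × List (String × String × String))
    (t : String × String × String) : PySem.Dict String String × List (String × String × String) :=
  let order := if st.1.contains t.2.2 then st.1 else st.1.insert t.2.2 (spkName st.1.size)
  (order, st.2 ++ [(t.1, t.2.1, (order.get? t.2.2).getD "")])

-- idxOf is unchanged by appending, for members of the left part
theorem idxOf_append_left {α : Type} [BEq α] [LawfulBEq α] (l₁ l₂ : List α) (a : α) (h : a ∈ l₁) :
    (l₁ ++ l₂).idxOf a = l₁.idxOf a := by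
  rw [List.idxOf_append, if_pos h]

-- idxOf in Set.update is idxOf in the base, for members of the base
theorem idxOf_update_of_mem (ful ls : List String) (a : String) (h : a ∈ ful) :
    (PySem.Set.update ful ls).idxOf a = ful.idxOf a := by
  rw [PySem.Set.update_eq_append_filter]
  exact idxOf_append_left _ _ _ h

-- the invariant-carrying characterisation of A's loop
theorem remapA_go (xs : List (String × String × String)) (d : PySem.Dict String String)
    (out : List (String × String × String)) (ful : List String)
    (hk : d.keys = ful) (hnd : ful.Nodup)
    (hg : ∀ l ∈ ful, d.get? l = some (spkName (ful.idxOf l))) :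
    (xs.foldl stepA (d, out)).2
    = out ++ xs.map (fun t => (t.1, t.2.1,
        spkName ((PySem.Set.update ful (xs.map (fun t => t.2.2))).idxOf t.2.2))) := by
  induction xs generalizing d out ful with
  | nil => simp
  | cons t xs ih =>
    obtain ⟨s, dur, l⟩ := t
    have hc : d.contains l = decide (l ∈ ful) := by
      rw [PySem.Dict.contains_eq_decide_mem_keys, hk]
    rw [List.foldl_cons]
    by_cases hmem : l ∈ ful
    · have hcl : d.contains l = true := by simp [hc, hmem]
      have hstep : stepA (d, out) (s, dur, l) = (d, out ++ [(s, dur, spkName (ful.idxOf l))]) := by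
        simp [stepA, hcl, hg l hmem]
      rw [hstep, ih d _ ful hk hnd hg]
      have hupd : PySem.Set.update ful (((s, dur, l) :: xs).map (fun t => t.2.2))
          = PySem.Set.update ful (xs.map (fun t => t.2.2)) := by
        rw [List.map_cons, PySem.Set.update_cons, PySem.Set.add_of_mem hmem]
      rw [hupd, List.map_cons, idxOf_update_of_mem _ _ _ hmem]
      simp
    · have hcl : d.contains l = false := by simp [hc, hmem]
      have hsize : d.size = ful.length := by
        have : d.keys.length = ful.length := by rw [hk]
        simpa [PySem.Dict.keys] using this
      have hk' : (d.insert l (spkName d.size)).keys = ful ++ [l] :=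
        PySem.Dict.keys_insert_of_not_contains d _ hcl |>.trans (by rw [hk])
      have hnd' : (ful ++ [l]).Nodup :=
        hnd.append (List.nodup_singleton l)
          (fun a ha hb => hmem ((List.mem_singleton.mp hb) ▸ ha))
      have hidxl : (ful ++ [l]).idxOf l = ful.length := by
        rw [List.idxOf_append, if_neg hmem]; simp
      have hg' : ∀ l' ∈ ful ++ [l],
          (d.insert l (spkName d.size)).get? l' = some (spkName ((ful ++ [l]).idxOf l')) := by
        intro l' hl'
        by_cases he : l' = l
        · subst he
          rw [PySem.Dict.get?_insert_self, hsize, hidxl]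
        · have hl'f : l' ∈ ful := by
            rcases List.mem_append.mp hl' with h | h
            · exact h
            · simp at h; exact absurd h he
          rw [PySem.Dict.get?_insert_of_ne d _ he, hg l' hl'f,
            idxOf_append_left _ _ _ hl'f]
      have hll : l ∈ ful ++ [l] := by simp
      have hstep : stepA (d, out) (s, dur, l)
          = (d.insert l (spkName d.size), out ++ [(s, dur, spkName ((ful ++ [l]).idxOf l))]) := by
        simp [stepA, hcl, hg' l hll]
      rw [hstep, ih _ _ (ful ++ [l]) hk' hnd' hg']
      have hupd : PySem.Set.update ful (((s, dur, l) :: xs).map (fun t => t.2.2))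
          = PySem.Set.update (ful ++ [l]) (xs.map (fun t => t.2.2)) := by
        rw [List.map_cons, PySem.Set.update_cons, PySem.Set.add_of_not_mem hmem]
      rw [hupd, List.map_cons, idxOf_update_of_mem _ _ _ hll, hidxl]
      simp

-- B's mapping looks up to the idxOf-based name on every label of firsts
theorem mapping_get (firsts : List String) (hnd : firsts.Nodup) (l : String) (hl : l ∈ firsts) :
    ((firsts.zipIdx.foldl (fun (d : PySem.Dict String String) p => d.insert p.1 (spkName p.2))
      PySem.Dict.empty).get? l) = some (spkName (firsts.idxOf l)) := by
  have hfst : firsts.zipIdx.map (fun p => p.1) = firsts := by simp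
  have hitems : (firsts.zipIdx.foldl
      (fun (d : PySem.Dict String String) p => d.insert p.1 (spkName p.2))
      PySem.Dict.empty).items
      = firsts.zipIdx.map (fun p => (p.1, spkName p.2)) := by
    have h := PySem.Dict.items_foldl_insert_fresh (ν := String) firsts.zipIdx
      (fun p => p.1) (fun p => spkName p.2) PySem.Dict.empty
      (fun a _ => rfl) (by rw [hfst]; exact hnd)
    simpa using h
  have hknd : (firsts.zipIdx.foldl
      (fun (d : PySem.Dict String String) p => d.insert p.1 (spkName p.2))
      PySem.Dict.empty).keys.Nodup := by
    have h := PySem.Dict.nodup_keys_foldl_insert_key (ν := String) firsts.zipIdx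
      (fun p => p.1) (fun _ p => spkName p.2) PySem.Dict.empty List.nodup_nil
    simpa using h
  apply PySem.Dict.get?_of_mem_items _ _ hknd
  rw [hitems]
  have hlt : firsts.idxOf l < firsts.length := List.idxOf_lt_length_of_mem hl
  have hz : (l, firsts.idxOf l) ∈ firsts.zipIdx := by
    rw [List.mem_zipIdx_iff_getElem?]
    simp [List.getElem?_eq_getElem hlt, List.getElem_idxOf]
  exact List.mem_map.mpr ⟨(l, firsts.idxOf l), hz, rfl⟩

-- ===== VERDICT (by name: the statement is the Claim_ definition above) =====
theorem remap_labels_in_order_str_spec : Claim_equal_remap_labels_in_order_str := by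
  intro segs _
  unfold Spec_remap_labels_in_order_str remap_labels_in_order_str_alt
  show (segs.foldl stepA (PySem.Dict.empty, [])).2 = _
  rw [remapA_go segs PySem.Dict.empty [] [] rfl List.nodup_nil (by intro l h; cases h)]
  rw [PySem.Set.update_nil_left]
  simp only [List.nil_append]
  apply List.map_congr_left
  intro t ht
  have hl : t.2.2 ∈ PySem.Set.ofList (segs.map (fun t => t.2.2)) := by
    rw [PySem.Set.mem_ofList]
    exact List.mem_map.mpr ⟨t, ht, rfl⟩
  rw [mapping_get _ (PySem.Set.nodup_ofList _) _ hl, Option.getD_some]
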